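-- pv_equiv track=rewrite | github.com/jwestrob/solenoid_finder | detect_solenoids.py | create_length_sorted_batches
-- ===== SOURCE A (Python) =====
-- from typing import Dict, List, Optional, Tuple
--
-- def create_length_sorted_batches(
--     items: List[Tuple[str, str]],
--     batch_size: int = 4,
--     max_tokens: int = 4096,
-- ) -> List[List[Tuple[str, str]]]:
--     """
--     Create batches sorted by length for efficient padding.
--
--     Args:
--         items: List of (uid, sequence) tuples
--         batch_size: Maximum sequences per batch
--         max_tokens: Maximum total tokens per batch
--
--     Returns:
--         List of batches, each batch is a list of (uid, sequence) tuples
--     """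
--     # Sort by length
--     sorted_items = sorted(items, key=lambda x: len(x[1]))
--
--     batches = []
--     current_batch = []
--     current_max_len = 0
--
--     for uid, seq in sorted_items:
--         seq_len = len(seq)
--         new_max_len = max(current_max_len, seq_len)
--         # +2 for BOS/EOS tokens
--         new_tokens = (new_max_len + 2) * (len(current_batch) + 1)
--
--         if len(current_batch) >= batch_size or new_tokens > max_tokens:
--             if current_batch:
--                 batches.append(current_batch)
--             current_batch = [(uid, seq)]
--             current_max_len = seq_len
--         else:
--             current_batch.append((uid, seq))
--             current_max_len = new_max_len
--
--     if current_batch: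
--         batches.append(current_batch)
--
--     return batches
-- ===== SOURCE B (Python) =====
-- def create_length_sorted_batches(items, batch_size=4, max_tokens=4096):
--     si = sorted(items, key=lambda x: len(x[1]))
--     # Pass 1: compute only the batch SIZES from the lengths. Because si is
--     # length-sorted, the running max of a batch is always the current item's
--     # length, so no max accumulator is needed and no batches are built here.
--     counts = []
--     c = 0
--     for _, seq in si:
--         L = len(seq)
--         if c >= batch_size or (L + 2) * (c + 1) > max_tokens:
--             if c:
--                 counts.append(c)
--             c = 1
--         else:
--             c += 1
--     if c:
--         counts.append(c)
--     # Pass 2: cut the sorted list at the computed boundaries.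
--     batches = []
--     for c in counts:
--         batches.append(si[:c])
--         si = si[c:]
--     return batches
-- ===== Notes on version B (the rewrite author's own statement) =====
-- stated objective: alternative
-- what changed: B drops A's running-max accumulator and in-scan batch building: exploiting that the list is length-sorted (batch max = current item's length), a first pass computes only the list of batch sizes arithmetically from the lengths, and a second pass cuts the sorted list at those boundaries.
import Mathlib
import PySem

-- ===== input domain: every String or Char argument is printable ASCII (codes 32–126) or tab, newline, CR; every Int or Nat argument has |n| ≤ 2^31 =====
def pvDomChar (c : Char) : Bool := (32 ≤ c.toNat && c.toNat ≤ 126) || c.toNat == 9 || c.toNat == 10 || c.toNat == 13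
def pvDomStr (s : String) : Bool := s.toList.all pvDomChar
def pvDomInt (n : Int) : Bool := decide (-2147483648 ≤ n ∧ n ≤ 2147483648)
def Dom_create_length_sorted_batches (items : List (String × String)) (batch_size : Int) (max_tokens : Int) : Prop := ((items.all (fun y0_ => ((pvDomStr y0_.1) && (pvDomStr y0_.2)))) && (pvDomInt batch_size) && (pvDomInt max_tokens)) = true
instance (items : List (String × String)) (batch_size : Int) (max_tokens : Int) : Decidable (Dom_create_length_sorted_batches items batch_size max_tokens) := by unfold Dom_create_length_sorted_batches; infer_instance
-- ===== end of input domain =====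

-- B replaces A's in-scan batch building with a running max by two staged passes: compute batch sizes from lengths (no max accumulator, using sortedness), then slice; alternative decomposition, same cost.


-- ===== PORT A =====
-- the for-loop over sorted_items with state (batches, current_batch, current_max_len)
def pvLoopA (batch_size max_tokens : Int) :
    List (String × String) → List (List (String × String)) → List (String × String) → Int →
    List (List (String × String))
  | [], batches, cur, _ => if cur = [] then batches else batches ++ [cur]
  | (uid, seq) :: rest, batches, cur, cmax =>
      let seq_len := PySem.Str.len seq
      let new_max_len := max cmax seq_len
      let new_tokens := (new_max_len + 2) * ((PySem.List.len cur) + 1)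
      if (PySem.List.len cur) ≥ batch_size ∨ new_tokens > max_tokens then
        pvLoopA batch_size max_tokens rest (if cur = [] then batches else batches ++ [cur]) [(uid, seq)] seq_len
      else
        pvLoopA batch_size max_tokens rest batches (cur ++ [(uid, seq)]) new_max_len

def create_length_sorted_batches (items : List (String × String)) (batch_size : Int) (max_tokens : Int) : List (List (String × String)) :=
  let sorted_items := PySem.List.sorted items (fun x => PySem.Str.len x.2)
  pvLoopA batch_size max_tokens sorted_items [] [] 0

-- ===== PORT B =====
-- pass 1: the batch sizes, computed from the lengths alone (counter c, no max)
def pvCountsB (batch_size max_tokens : Int) :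
    List (String × String) → Int → List Int
  | [], c => if c ≠ 0 then [c] else []
  | y :: rest, c =>
      let L := PySem.Str.len y.2
      if c ≥ batch_size ∨ (L + 2) * (c + 1) > max_tokens then
        (if c ≠ 0 then c :: pvCountsB batch_size max_tokens rest 1
         else pvCountsB batch_size max_tokens rest 1)
      else
        pvCountsB batch_size max_tokens rest (c + 1)

-- pass 2: cut the sorted list at the computed boundaries (si[:c] / si[c:])
def pvSliceB : List Int → List (String × String) → List (List (String × String))
  | [], _ => []
  | c :: cs, si => PySem.List.slice si none (some c) :: pvSliceB cs (PySem.List.slice si (some c) none)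

def create_length_sorted_batches_alt (items : List (String × String)) (batch_size : Int) (max_tokens : Int) : List (List (String × String)) :=
  let si := PySem.List.sorted items (fun x => PySem.Str.len x.2)
  pvSliceB (pvCountsB batch_size max_tokens si 0) si

-- ===== PRECONDITION & SPEC =====
def Spec_create_length_sorted_batches (items : List (String × String)) (batch_size : Int) (max_tokens : Int) (out : List (List (String × String))) : Prop := out = create_length_sorted_batches_alt items batch_size max_tokens
instance (items : List (String × String)) (batch_size : Int) (max_tokens : Int) (out : List (List (String × String))) : Decidable (Spec_create_length_sorted_batches items batch_size max_tokens out) := by unfold Spec_create_length_sorted_batches; infer_instance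

-- ===== CLAIM =====
def Claim_equal_create_length_sorted_batches : Prop := ∀ (items : List (String × String)) (batch_size : Int) (max_tokens : Int), Dom_create_length_sorted_batches items batch_size max_tokens → Spec_create_length_sorted_batches items batch_size max_tokens (create_length_sorted_batches items batch_size max_tokens)

-- ===== LEMMAS AND PROOFS =====

-- key invariant: on a key-nondecreasing suffix l whose lengths dominate cmax,
-- A's loop equals the closed batches followed by slicing (cur ++ l) at the counts
theorem pvLoopA_eq_counts (batch_size max_tokens : Int) :
    ∀ (l cur : List (String × String)) (batches : List (List (String × String))) (cmax : Int),
      List.Pairwise (fun a b => PySem.Str.len a.2 ≤ PySem.Str.len b.2) l →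
      (∀ y ∈ l, cmax ≤ PySem.Str.len y.2) →
      pvLoopA batch_size max_tokens l batches cur cmax =
        batches ++ pvSliceB (pvCountsB batch_size max_tokens l ((cur.length : Int))) (cur ++ l) := by
  intro l
  induction l with
  | nil =>
      intro cur batches cmax _ _
      by_cases h : cur = []
      · simp [pvLoopA, pvCountsB, pvSliceB, h]
      · have hl : ((cur.length : Int)) ≠ 0 := by
          intro hh
          exact h (List.length_eq_zero_iff.mp (by exact_mod_cast hh))
        simp [pvLoopA, pvCountsB, pvSliceB, h, hl, PySem.List.slice_to_natCast,
          PySem.List.slice_from_natCast]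
  | cons y rest ih =>
      intro cur batches cmax hpw hle
      obtain ⟨uid, seq⟩ := y
      have h0 : cmax ≤ PySem.Str.len seq := hle (uid, seq) (by simp)
      have hmax : max cmax (PySem.Str.len seq) = PySem.Str.len seq := max_eq_right h0
      have hpw' : List.Pairwise (fun a b => PySem.Str.len a.2 ≤ PySem.Str.len b.2) rest :=
        (List.pairwise_cons.mp hpw).2
      have hdom : ∀ z ∈ rest, PySem.Str.len seq ≤ PySem.Str.len z.2 := by
        intro z hz; exact (List.pairwise_cons.mp hpw).1 z hz
      simp only [pvLoopA, pvCountsB, PySem.List.len_eq, hmax]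
      by_cases hc : ((cur.length : Int)) ≥ batch_size ∨
          (PySem.Str.len seq + 2) * ((cur.length : Int) + 1) > max_tokens
      · rw [if_pos hc, if_pos hc]
        rcases eq_or_ne cur [] with h | h
        · subst h
          rw [if_pos rfl, if_neg (by simp),
            ih [(uid, seq)] batches (PySem.Str.len seq) hpw' hdom]
          simp
        · have hl : ((cur.length : Int)) ≠ 0 := by
            intro hh
            exact h (List.length_eq_zero_iff.mp (by exact_mod_cast hh))
          rw [if_neg h, if_pos hl,
            ih [(uid, seq)] (batches ++ [cur]) (PySem.Str.len seq) hpw' hdom]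
          simp [pvSliceB, PySem.List.slice_to_natCast, PySem.List.slice_from_natCast,
            List.take_left]
      · rw [if_neg hc, if_neg hc,
          ih (cur ++ [(uid, seq)]) batches (PySem.Str.len seq) hpw' hdom]
        have hlen : (((cur ++ [(uid, seq)]).length : Int)) = (cur.length : Int) + 1 := by
          simp
        rw [hlen]
        simp

-- ===== VERDICT =====
theorem create_length_sorted_batches_spec : Claim_equal_create_length_sorted_batches := by
  intro items batch_size max_tokens _
  unfold Spec_create_length_sorted_batches create_length_sorted_batches create_length_sorted_batches_alt
  have h := pvLoopA_eq_counts batch_size max_tokens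
      (PySem.List.sorted items (fun x => PySem.Str.len x.2)) [] [] 0
      (PySem.List.sorted_pairwise items (fun x => PySem.Str.len x.2))
      (by intro y _; simp [PySem.Str.len_eq])
  simpa using h
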